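-- pv_equiv track=rewrite | github.com/allandeee/AI329_Ass3 | code_testing.py | play_ind
-- ===== SOURCE A (Python) =====
-- def play_ind(bits):
--     score = 0
--     for p1, p2 in zip(bits[0::2], bits[1::2]):
--         if p1 == 1:
--             if p2 == 1:
--                 score += 3
--             else:
--                 score += 0
--         else:
--             if p2 == 1:
--                 score += 5
--             else:
--                 score += 1
--     return score
-- ===== SOURCE B (Python) =====
-- def play_ind(bits):
--     # aggregate-count formulation: score = n - ones1 + 4*ones2 - both
--     a = bits[0::2]
--     b = bits[1::2]
--     n = min(len(a), len(b))
--     a = a[:n]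
--     b = b[:n]
--     ones1 = sum(1 for x in a if x == 1)
--     ones2 = sum(1 for y in b if y == 1)
--     both = sum(1 for x, y in zip(a, b) if x == 1 and y == 1)
--     return n - ones1 + 4 * ones2 - both
-- ===== Notes on version B (the rewrite author's own statement) =====
-- stated objective: alternative
-- what changed: Replaces the per-pair nested if/else accumulation with a closed-form count formulation: score = n - count(p1==1) + 4*count(p2==1) - count(both==1) over the two stride slices.
import Mathlib
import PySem

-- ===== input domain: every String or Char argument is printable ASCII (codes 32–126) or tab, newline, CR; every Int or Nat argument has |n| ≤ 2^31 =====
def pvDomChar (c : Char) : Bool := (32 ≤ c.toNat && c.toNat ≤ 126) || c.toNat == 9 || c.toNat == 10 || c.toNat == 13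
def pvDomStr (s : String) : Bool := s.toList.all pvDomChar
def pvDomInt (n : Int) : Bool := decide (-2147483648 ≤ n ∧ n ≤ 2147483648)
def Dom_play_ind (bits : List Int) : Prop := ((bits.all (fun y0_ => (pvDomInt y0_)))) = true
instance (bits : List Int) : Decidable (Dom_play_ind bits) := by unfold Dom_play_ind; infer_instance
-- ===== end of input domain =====

-- B replaces the per-pair branch accumulation with an aggregate-count formula
-- score = n - ones1 + 4*ones2 - both over the same stride slices (alternative, same cost).


-- ===== PORT A =====
def play_ind (bits : List Int) : Int :=
  let evens := (PySem.List.slice? bits (some 0) none 2).getD []   -- bits[0::2]; step 2 ≠ 0, never none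
  let odds  := (PySem.List.slice? bits (some 1) none 2).getD []   -- bits[1::2]
  (List.zip evens odds).foldl
    (fun score pq =>
      if pq.1 == 1 then
        if pq.2 == 1 then score + 3 else score + 0
      else
        if pq.2 == 1 then score + 5 else score + 1) 0

-- ===== PORT B =====
def play_ind_alt (bits : List Int) : Int :=
  let a := (PySem.List.slice? bits (some 0) none 2).getD []   -- bits[0::2]
  let b := (PySem.List.slice? bits (some 1) none 2).getD []   -- bits[1::2]
  let n := min a.length b.length
  let a' := a.take n
  let b' := b.take n
  let ones1 : Int := a'.countP (fun x => x == 1)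
  let ones2 : Int := b'.countP (fun y => y == 1)
  let both : Int := (List.zip a' b').countP (fun p => p.1 == 1 && p.2 == 1)
  (n : Int) - ones1 + 4 * ones2 - both

-- ===== PRECONDITION & SPEC =====
def Spec_play_ind (bits : List Int) (out : Int) : Prop := out = play_ind_alt bits
instance (bits : List Int) (out : Int) : Decidable (Spec_play_ind bits out) := by unfold Spec_play_ind; infer_instance

-- ===== CLAIM (what is proved, stated in full; the proofs are below) =====
def Claim_equal_play_ind : Prop := ∀ (bits : List Int), Dom_play_ind bits → Spec_play_ind bits (play_ind bits)

-- ===== LEMMAS AND PROOFS =====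

theorem play_ind_key (a b : List Int) (s : Int) :
    (List.zip a b).foldl
      (fun score pq =>
        if pq.1 == 1 then
          if pq.2 == 1 then score + 3 else score + 0
        else
          if pq.2 == 1 then score + 5 else score + 1) s
    = s + ((min a.length b.length : Nat) : Int)
        - ((a.take (min a.length b.length)).countP (fun x => x == 1) : Int)
        + 4 * ((b.take (min a.length b.length)).countP (fun y => y == 1) : Int)
        - ((List.zip (a.take (min a.length b.length)) (b.take (min a.length b.length))).countP
            (fun p => p.1 == 1 && p.2 == 1) : Int) := by
  induction a generalizing b s with
  | nil => simp
  | cons x xs ih =>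
    cases b with
    | nil => simp
    | cons y ys =>
      have hmin : min (x :: xs).length (y :: ys).length = min xs.length ys.length + 1 := by
        simp only [List.length_cons]; omega
      rw [List.zip_cons_cons, List.foldl_cons, ih, hmin]
      simp only [List.take_succ_cons, List.countP_cons, List.zip_cons_cons]
      by_cases hx : x = 1 <;> by_cases hy : y = 1 <;>
        simp [hx, hy] <;> push_cast <;> ring

theorem play_ind_spec : Claim_equal_play_ind := by
  intro bits _
  unfold Spec_play_ind play_ind play_ind_alt
  simp only []
  rw [play_ind_key, zero_add]
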